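-- pv_equiv track=rewrite | github.com/soda723/codingtest | ms/[추가] [PGS] 기능개발.py | solution
-- ===== SOURCE A (Python) =====
-- import math
--
-- def solution(progresses, speeds):
--     finish = []
--     queue = []
--     answer = []
--
--     for i in range(len(progresses)):
--         finish.append(math.ceil((100 - progresses[i]) / speeds[i]))
--
--     for i in range(len(finish)):
--         if (len(queue) == 0) or (queue[0] >= finish[i]):
--             pass
--         else:
--             answer.append(len(queue))
--             queue.clear()
--
--         queue.append(finish[i])
--
--         if i == (len(finish) - 1):
--             answer.append(len(queue))
--
--     return answer
-- ===== SOURCE B (Python) =====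
-- def solution(progresses, speeds):
--     # Different algorithm: each job's actual release day is the running maximum of
--     # the finish times seen so far; a deployment group is exactly a maximal run of
--     # equal release days, so run-length-encode that list with a two-pointer scan.
--     release = []
--     m = 0
--     for p, s in zip(progresses, speeds):
--         f = -((p - 100) // s)
--         if not release or f > m:
--             m = f
--         release.append(m)
--     answer = []
--     i = 0
--     n = len(release)
--     while i < n:
--         j = i + 1
--         while j < n and release[j] == release[i]:
--             j += 1
--         answer.append(j - i)
--         i = j
--     return answer
-- ===== Notes on version B (the rewrite author's own statement) =====
-- stated objective: alternative
-- what changed: Instead of A's queue-based greedy grouping (compare each finish to the current group leader, flush and clear the queue), B first materialises each job's actual release day as the running maximum of finish times, then run-length-encodes that list with a two-pointer index scan; it also uses exact integer ceiling division instead of float math.ceil.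
import Mathlib
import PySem

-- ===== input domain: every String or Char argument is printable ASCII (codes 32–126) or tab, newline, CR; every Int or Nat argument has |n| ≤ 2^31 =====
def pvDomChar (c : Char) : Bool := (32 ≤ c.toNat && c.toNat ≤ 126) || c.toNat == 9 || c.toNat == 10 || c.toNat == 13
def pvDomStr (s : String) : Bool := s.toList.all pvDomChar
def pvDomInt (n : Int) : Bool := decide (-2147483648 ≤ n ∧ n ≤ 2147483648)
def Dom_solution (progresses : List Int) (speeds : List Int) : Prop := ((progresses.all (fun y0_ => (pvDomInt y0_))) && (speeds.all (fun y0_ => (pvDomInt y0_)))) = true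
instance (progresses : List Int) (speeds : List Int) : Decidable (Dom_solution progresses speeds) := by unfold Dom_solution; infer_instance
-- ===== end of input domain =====

-- B replaces A's queue-based greedy grouping by a different algorithm: it materialises each
-- job's release day as the running maximum of finish times, then run-length-encodes that
-- list with a two-pointer index scan; objective: alternative.

-- ===== PORT A =====
-- math.ceil((100 - p) / s): Python computes a float division and ceils it; on Dom
-- (|ints| ≤ 2^31 < 2^53) the correctly-rounded double division never crosses an integer,
-- so the integer ceiling -((-(100-p)) // s) is an exact port there (s ≠ 0 is in Pre_).
def pvCeilA (p s : Int) : Int := -(PySem.Int.floordiv (-(100 - p)) s)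

-- body of A's second loop (index i over finish; flush, append, in-loop last-index check)
def pvBodyA (finish : List Int) (st : List Int × List Int) (i : Int) : List Int × List Int :=
  let f := PySem.List.pyGetD finish i 0
  let st1 : List Int × List Int :=
    if st.1.length = 0 ∨ PySem.List.pyGetD st.1 0 0 ≥ f then st
    else ([], st.2 ++ [(st.1.length : Int)])
  let queue := st1.1 ++ [f]
  let answer := if i = (finish.length : Int) - 1 then st1.2 ++ [(queue.length : Int)] else st1.2
  (queue, answer)

def solution (progresses : List Int) (speeds : List Int) : List Int :=
  let finish : List Int :=
    (PySem.List.pyRange 0 (progresses.length : Int) 1).foldl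
      (fun acc i => acc ++ [pvCeilA (PySem.List.pyGetD progresses i 0) (PySem.List.pyGetD speeds i 0)]) []
  ((PySem.List.pyRange 0 (finish.length : Int) 1).foldl (pvBodyA finish) ([], [])).2

-- ===== PORT B =====
-- Source B first loop: running-maximum release list (state = (release, m))
def pvRelStep (st : List Int × Int) (ps : Int × Int) : List Int × Int :=
  let f := -(PySem.Int.floordiv (ps.1 - 100) ps.2)
  let m := if st.1 = [] ∨ f > st.2 then f else st.2
  (st.1 ++ [m], m)

-- Source B inner while: advance j while release[j] == v
def pvRunEnd (rel : List Int) (v : Int) (j : Nat) : Nat :=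
  if h : j < rel.length ∧ PySem.List.pyGetD rel (j : Int) 0 = v then pvRunEnd rel v (j + 1)
  else j
termination_by rel.length - j
decreasing_by omega

-- the port (pvRLEIdx, below the claim block it is proved to need only this) cites this bound
theorem pvRunEnd_ge (rel : List Int) (v : Int) (j : Nat) : j ≤ pvRunEnd rel v j := by
  unfold pvRunEnd
  split
  · exact le_trans (Nat.le_succ j) (pvRunEnd_ge rel v (j + 1))
  · exact le_refl j
termination_by rel.length - j
decreasing_by omega

-- Source B outer while: run-length encoding by two indices
def pvRLEIdx (rel : List Int) (i : Nat) (acc : List Int) : List Int :=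
  if _h : i < rel.length then
    let j := pvRunEnd rel (PySem.List.pyGetD rel (i : Int) 0) (i + 1)
    pvRLEIdx rel j (acc ++ [((j - i : Nat) : Int)])
  else acc
termination_by rel.length - i
decreasing_by have := pvRunEnd_ge rel (PySem.List.pyGetD rel (i : Int) 0) (i + 1); omega

def solution_alt (progresses : List Int) (speeds : List Int) : List Int :=
  let release := ((progresses.zip speeds).foldl pvRelStep ([], 0)).1
  pvRLEIdx release 0 []

-- ===== PRECONDITION & SPEC =====
-- A raises IndexError when speeds is shorter than progresses and ZeroDivisionError when a
-- used speed is 0; Pre_ excludes exactly those inputs (everywhere else A returns normally).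
def Pre_solution (progresses : List Int) (speeds : List Int) : Prop :=
  progresses.length ≤ speeds.length ∧ ∀ x ∈ speeds.take progresses.length, x ≠ 0
instance (progresses : List Int) (speeds : List Int) : Decidable (Pre_solution progresses speeds) := by
  unfold Pre_solution; infer_instance

def pvWitness_solution : List Int × List Int := ([93, 30, 55], [1, 30, 5])

def Spec_solution (progresses : List Int) (speeds : List Int) (out : List Int) : Prop := out = solution_alt progresses speeds
instance (progresses : List Int) (speeds : List Int) (out : List Int) : Decidable (Spec_solution progresses speeds out) := by unfold Spec_solution; infer_instance

-- ===== CLAIM (what is proved, stated in full; the proofs are below) =====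
def Claim_equal_solution : Prop := ∀ (progresses : List Int) (speeds : List Int), Dom_solution progresses speeds → Pre_solution progresses speeds → Spec_solution progresses speeds (solution progresses speeds)

-- ===== LEMMAS AND PROOFS =====

-- clean per-finish step of A's grouping loop (no index, no last-index check)
def pvStep (st : List Int × List Int) (f : Int) : List Int × List Int :=
  let st1 : List Int × List Int :=
    if st.1.length = 0 ∨ PySem.List.pyGetD st.1 0 0 ≥ f then st
    else ([], st.2 ++ [(st.1.length : Int)])
  (st1.1 ++ [f], st1.2)

-- length of the initial run of value v
def pvRunLen (v : Int) : List Int → Nat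
  | [] => 0
  | y :: ys => if y = v then pvRunLen v ys + 1 else 0

-- clean structural run-length encoding
def pvRLEspec : List Int → List Int
  | [] => []
  | x :: xs => ((pvRunLen x xs + 1 : Nat) : Int) :: pvRLEspec (xs.drop (pvRunLen x xs))
termination_by l => l.length
decreasing_by simp

theorem pvRLEspec_nil : pvRLEspec [] = [] := by rw [pvRLEspec.eq_def]

theorem pvRLEspec_cons (x : Int) (xs : List Int) :
    pvRLEspec (x :: xs)
    = ((pvRunLen x xs + 1 : Nat) : Int) :: pvRLEspec (xs.drop (pvRunLen x xs)) := by
  rw [pvRLEspec.eq_def]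

-- running maximum seeded with m
def pvRelFrom (m : Int) : List Int → List Int
  | [] => []
  | f :: fs => (if f > m then f else m) :: pvRelFrom (if f > m then f else m) fs

theorem pvGetD0_append (q t : List Int) (h : q ≠ []) :
    PySem.List.pyGetD (q ++ t) 0 0 = PySem.List.pyGetD q 0 0 := by
  cases q with
  | nil => exact absurd rfl h
  | cons x xs => simp [PySem.List.pyGetD_zero]

-- A's finish-building loop is the map of the integer ceiling over the zip
theorem pv_finish_eq (P S : List Int) (h : P.length ≤ S.length) :
    (PySem.List.pyRange 0 (P.length : Int) 1).foldl
      (fun acc i => acc ++ [pvCeilA (PySem.List.pyGetD P i 0) (PySem.List.pyGetD S i 0)]) []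
    = (P.zip S).map (fun ps => pvCeilA ps.1 ps.2) := by
  rw [PySem.List.foldl_append_singleton_eq_map]
  apply List.ext_getElem
  · simp [PySem.List.length_pyRange_one]; omega
  · intro k h1 h2
    have hk : k < P.length := by
      simpa [PySem.List.length_pyRange_one] using h1
    have hkS : k < S.length := lt_of_lt_of_le hk h
    simp [PySem.List.getElem_pyRange_one, PySem.List.pyGetD_natCast,
      List.getD_eq_getElem?_getD, hk, hkS]

theorem pvFoldlCongr {α β : Type} (l : List α) (f g : β → α → β) (init : β)
    (h : ∀ (st : β) (x : α), x ∈ l → f st x = g st x) : l.foldl f init = l.foldl g init := by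
  induction l generalizing init with
  | nil => rfl
  | cons x xs ih =>
    simp only [List.foldl_cons]
    rw [h init x (List.mem_cons_self ..)]
    exact ih _ (fun st y hy => h st y (List.mem_cons_of_mem _ hy))

-- A's indexed grouping loop over a nonempty finish list = plain foldl of pvStep, plus a
-- final append of the last group's size
theorem pv_mainA (xs : List Int) (q a : List Int) (hxs : xs ≠ []) :
    ((PySem.List.pyRange 0 (xs.length : Int) 1).foldl (pvBodyA xs) (q, a)).2
    = (xs.foldl pvStep (q, a)).2 ++ [((xs.foldl pvStep (q, a)).1.length : Int)] := by
  rcases List.eq_nil_or_concat xs with rfl | ⟨ys, z, rfl⟩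
  · exact absurd rfl hxs
  · simp only [List.concat_eq_append] at hxs ⊢
    have hlen : (((ys ++ [z]).length : Nat) : Int) = (ys.length : Int) + 1 := by simp
    rw [hlen, PySem.List.pyRange_one_succ_right (Int.natCast_nonneg _), List.foldl_append]
    have hcong : ∀ (st : List Int × List Int) (i : Int), i ∈ PySem.List.pyRange 0 (ys.length : Int) 1 →
        pvBodyA (ys ++ [z]) st i = pvStep st (PySem.List.pyGetD ys i 0) := by
      intro st i hi
      have hb := (PySem.List.mem_pyRange_one).1 hi
      obtain ⟨k, rfl⟩ : ∃ k : Nat, i = (k : Int) := ⟨i.toNat, (Int.toNat_of_nonneg hb.1).symm⟩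
      have hk : k < ys.length := by exact_mod_cast hb.2
      have hget : PySem.List.pyGetD (ys ++ [z]) (k : Int) 0 = PySem.List.pyGetD ys (k : Int) 0 := by
        rw [PySem.List.pyGetD_natCast, PySem.List.pyGetD_natCast,
            List.getD_eq_getElem?_getD, List.getD_eq_getElem?_getD,
            List.getElem?_append_left hk]
      have hlast : ¬ ((k : Int) = (((ys ++ [z]).length : Nat) : Int) - 1) := by simp; omega
      simp only [pvBodyA, pvStep, hget, if_neg hlast]
    rw [pvFoldlCongr _ _ (fun st i => pvStep st (PySem.List.pyGetD ys i 0)) _ hcong,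
        PySem.List.foldl_pyRange_zero_pyGetD' ys 0 pvStep (q, a)]
    have hgetz : PySem.List.pyGetD (ys ++ [z]) (ys.length : Int) 0 = z := by
      rw [PySem.List.pyGetD_natCast]
      simp [List.getD_eq_getElem?_getD]
    have hlast : ((ys.length : Nat) : Int) = (((ys ++ [z]).length : Nat) : Int) - 1 := by simp
    simp only [List.foldl_append, List.foldl_cons, List.foldl_nil, pvBodyA, pvStep,
      hgetz, if_pos hlast]

-- run length over a replicate-prefix
theorem pvRunLen_replicate_append (v : Int) (j : Nat) (ys : List Int) :
    pvRunLen v (List.replicate j v ++ ys) = j + pvRunLen v ys := by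
  induction j with
  | zero => simp
  | succ j ih => simp [List.replicate_succ, pvRunLen, ih]; omega

theorem pvRunLen_zero (v : Int) (ys : List Int) (h : ys.head? ≠ some v) :
    pvRunLen v ys = 0 := by
  cases ys with
  | nil => rfl
  | cons y t =>
    simp only [List.head?_cons, ne_eq, Option.some.injEq] at h
    simp [pvRunLen, h]

-- RLE of k copies of v followed by a list not starting with v
theorem pvRLEspec_replicate_append (k : Nat) (hk : 1 ≤ k) (v : Int) (ys : List Int)
    (h : ys.head? ≠ some v) :
    pvRLEspec (List.replicate k v ++ ys) = ((k : Nat) : Int) :: pvRLEspec ys := by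
  obtain ⟨j, rfl⟩ : ∃ j, k = j + 1 := ⟨k - 1, by omega⟩
  rw [List.replicate_succ, List.cons_append, pvRLEspec_cons]
  rw [pvRunLen_replicate_append, pvRunLen_zero v ys h, Nat.add_zero]
  have hd : (List.replicate j v ++ ys).drop j = ys := by simp
  simp only [Nat.add_zero, hd]

-- pvRunEnd = start + run length of the dropped suffix
theorem pvRunEnd_eq (rel : List Int) (v : Int) (j : Nat) :
    pvRunEnd rel v j = j + pvRunLen v (rel.drop j) := by
  unfold pvRunEnd
  split
  · rename_i h
    obtain ⟨hj, hv⟩ := h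
    have hdrop : rel.drop j = rel[j] :: rel.drop (j + 1) := List.drop_eq_getElem_cons hj
    have hv' : rel[j] = v := by
      rw [PySem.List.pyGetD_natCast, List.getD_eq_getElem?_getD, List.getElem?_eq_getElem hj] at hv
      simpa using hv
    rw [pvRunEnd_eq rel v (j + 1), hdrop, hv', pvRunLen, if_pos rfl]
    omega
  · rename_i h
    rw [not_and_or] at h
    by_cases hj : j < rel.length
    · have h' : ¬ PySem.List.pyGetD rel (j : Int) 0 = v := by tauto
      have hdrop : rel.drop j = rel[j] :: rel.drop (j + 1) := List.drop_eq_getElem_cons hj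
      have hv' : PySem.List.pyGetD rel (j : Int) 0 = rel[j] := by
        rw [PySem.List.pyGetD_natCast, List.getD_eq_getElem?_getD, List.getElem?_eq_getElem hj]
        simp
      rw [hdrop, pvRunLen, if_neg (by rw [← hv']; exact fun hc => h' hc)]
      omega
    · rw [List.drop_eq_nil_of_le (by omega)]; simp [pvRunLen]
termination_by rel.length - j
decreasing_by omega

-- the index scan computes the structural RLE of the dropped suffix
theorem pvRLEIdx_eq (rel : List Int) (i : Nat) (acc : List Int) :
    pvRLEIdx rel i acc = acc ++ pvRLEspec (rel.drop i) := by
  unfold pvRLEIdx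
  split
  · rename_i hi
    have hv' : PySem.List.pyGetD rel (i : Int) 0 = rel[i] := by
      rw [PySem.List.pyGetD_natCast, List.getD_eq_getElem?_getD, List.getElem?_eq_getElem hi]
      simp
    rw [hv', pvRLEIdx_eq, pvRunEnd_eq]
    have h1 : i + 1 + pvRunLen rel[i] (rel.drop (i + 1)) - i
        = pvRunLen rel[i] (rel.drop (i + 1)) + 1 := by omega
    have h2 : rel.drop (i + 1 + pvRunLen rel[i] (rel.drop (i + 1)))
        = (rel.drop (i + 1)).drop (pvRunLen rel[i] (rel.drop (i + 1))) := by
      rw [List.drop_drop]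
    rw [h1, h2, List.drop_eq_getElem_cons hi, pvRLEspec_cons]
    simp
  · rename_i hi
    rw [List.drop_eq_nil_of_le (by omega), pvRLEspec_nil, List.append_nil]
termination_by rel.length - i
decreasing_by
  have hb := pvRunEnd_ge rel rel[i] (i + 1)
  omega

-- B's first loop computes the seeded running maximum
theorem pv_rel_eq (zs : List (Int × Int)) : ∀ (rel : List Int) (m : Int), rel ≠ [] →
    (zs.foldl pvRelStep (rel, m)).1
    = rel ++ pvRelFrom m (zs.map (fun ps => pvCeilA ps.1 ps.2)) := by
  induction zs with
  | nil => intro rel m _; simp [pvRelFrom]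
  | cons ps rest ih =>
    intro rel m hrel
    simp only [List.foldl_cons, List.map_cons]
    have hf : -(PySem.Int.floordiv (ps.1 - 100) ps.2) = pvCeilA ps.1 ps.2 := by
      rw [pvCeilA, neg_sub]
    set f := pvCeilA ps.1 ps.2 with hfdef
    have hstep : pvRelStep (rel, m) ps
        = (rel ++ [if f > m then f else m], if f > m then f else m) := by
      simp only [pvRelStep, hf]
      by_cases hfm : f > m
      · simp [hfm, hrel]
      · simp [hfm, hrel]
    rw [hstep, ih (rel ++ [if f > m then f else m]) (if f > m then f else m) (by simp),
        pvRelFrom]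
    simp

-- main invariant: A's grouping fold (with final flush) is the RLE of the pending run
-- (q.length copies of lead) followed by the running maximum of the remaining finishes
theorem pv_main (fs : List Int) : ∀ (q a : List Int) (lead : Int), q ≠ [] →
    PySem.List.pyGetD q 0 0 = lead →
    (fs.foldl pvStep (q, a)).2 ++ [((fs.foldl pvStep (q, a)).1.length : Int)]
    = a ++ pvRLEspec (List.replicate q.length lead ++ pvRelFrom lead fs) := by
  induction fs with
  | nil =>
    intro q a lead hq hlead
    simp only [List.foldl_nil, pvRelFrom, List.append_nil]
    have hrep := pvRLEspec_replicate_append q.length (List.length_pos_iff.2 hq) lead [] (by simp)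
    rw [List.append_nil] at hrep
    rw [hrep, pvRLEspec_nil]
  | cons f rest ih =>
    intro q a lead hq hlead
    simp only [List.foldl_cons, pvRelFrom]
    by_cases hge : lead ≥ f
    · have hstep : pvStep (q, a) f = (q ++ [f], a) := by
        simp only [pvStep]
        rw [if_pos (Or.inr (hlead ▸ hge))]
      have hm : (if f > lead then f else lead) = lead := by
        rw [if_neg (not_lt.2 hge)]
      rw [hstep, hm, ih (q ++ [f]) a lead (by simp) (by rw [pvGetD0_append q [f] hq, hlead])]
      congr 2
      simp only [List.length_append, List.length_singleton]
      rw [List.replicate_add, List.replicate_one]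
      simp
    · rw [not_le] at hge
      have hstep : pvStep (q, a) f = ([f], a ++ [(q.length : Int)]) := by
        simp only [pvStep]
        split_ifs with h1
        · rcases h1 with h1 | h1
          · exact absurd (List.length_eq_zero_iff.1 h1) hq
          · rw [hlead] at h1; omega
        · rfl
      have hm : (if f > lead then f else lead) = f := by rw [if_pos hge]
      rw [hstep, hm, ih [f] (a ++ [(q.length : Int)]) f (by simp) (by simp [PySem.List.pyGetD_zero])]
      rw [List.append_assoc]
      congr 1
      rw [pvRLEspec_replicate_append q.length (List.length_pos_iff.2 hq) lead
            (f :: pvRelFrom f rest) (by simp; omega)]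
      simp

-- ===== VERDICT (by name: the statement is the Claim_ definition above) =====
theorem solution_spec : Claim_equal_solution := by
  intro P S _ hpre
  unfold Spec_solution
  simp only [solution, solution_alt]
  rw [pv_finish_eq P S hpre.1]
  cases hz : P.zip S with
  | nil =>
    simp [PySem.List.pyRange_one_eq_nil (le_refl (0 : Int)), pvRLEIdx]
  | cons z rest =>
    have hm : (z :: rest).map (fun ps => pvCeilA ps.1 ps.2) ≠ [] := by simp
    rw [pv_mainA _ [] [] hm]
    -- B side: release list
    simp only [List.foldl_cons, List.map_cons]
    have hstep0 : pvRelStep ([], 0) z = ([pvCeilA z.1 z.2], pvCeilA z.1 z.2) := by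
      simp [pvRelStep, pvCeilA, neg_sub]
    rw [hstep0]
    have h1 := pv_rel_eq rest [pvCeilA z.1 z.2] (pvCeilA z.1 z.2) (by simp)
    rw [h1, pvRLEIdx_eq, List.drop_zero, List.nil_append]
    -- A side via the main invariant, starting after the first pvStep
    have hstepA : pvStep (([] : List Int), ([] : List Int)) (pvCeilA z.1 z.2)
        = ([pvCeilA z.1 z.2], []) := by simp [pvStep]
    simp only [hstepA]
    rw [pv_main (rest.map (fun ps => pvCeilA ps.1 ps.2)) [pvCeilA z.1 z.2] [] (pvCeilA z.1 z.2)
          (by simp) (by simp [PySem.List.pyGetD_zero])]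
    simp
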